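-- pv_equiv track=rewrite | github.com/kenbockler/Andmeteaduse_masin-ppe_projekt | PROJEKT/K05/S276/2021-09-29-19-07-11/kodu3.py | moos
-- ===== SOURCE A (Python) =====
-- def moos(x, y, z):
--     karbid = 0
--     while x>0 and z//5>=1:
--         karbid += 1
--         z -= 5
--         x -= 1
--     if z<=y:
--         karbid += z
--         return(karbid)
--     else:
--         return(-1)
-- ===== SOURCE B (Python) =====
-- def moos(x, y, z):
--     karbid = max(0, min(x, z // 5))
--     z -= 5 * karbid
--     return karbid + z if z <= y else -1
-- ===== Notes on version B (the rewrite author's own statement) =====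
-- stated objective: faster
-- what changed: Replaces the per-jar while loop with a closed-form count k = max(0, min(x, z // 5)) and one subtraction.
import Mathlib
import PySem

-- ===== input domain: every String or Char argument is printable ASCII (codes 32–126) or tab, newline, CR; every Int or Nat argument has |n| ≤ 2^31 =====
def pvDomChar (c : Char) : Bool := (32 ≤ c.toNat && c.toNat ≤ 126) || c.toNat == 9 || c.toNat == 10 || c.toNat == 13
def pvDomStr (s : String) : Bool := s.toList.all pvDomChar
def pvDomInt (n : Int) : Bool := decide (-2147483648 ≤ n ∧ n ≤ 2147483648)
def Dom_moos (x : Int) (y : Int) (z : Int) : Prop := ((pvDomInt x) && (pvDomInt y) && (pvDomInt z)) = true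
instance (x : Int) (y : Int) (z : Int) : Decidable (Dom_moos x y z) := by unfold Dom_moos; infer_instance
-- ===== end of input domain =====

-- B replaces A's per-jar while loop with a closed-form count (O(1) vs O(min(x, z/5))).


-- ===== PORT A =====
-- A's while loop: state (karbid, z, x); terminates because x strictly decreases while x > 0.
def moosLoop (x : Int) (z : Int) (karbid : Int) : Int × Int :=
  if h : x > 0 ∧ PySem.Int.floordiv z 5 ≥ 1 then
    moosLoop (x - 1) (z - 5) (karbid + 1)
  else
    (karbid, z)
termination_by x.toNat
decreasing_by omega

def moos (x : Int) (y : Int) (z : Int) : Int :=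
  let (karbid, z) := moosLoop x z 0
  if z ≤ y then karbid + z else -1

-- ===== PORT B =====
def moos_alt (x : Int) (y : Int) (z : Int) : Int :=
  let karbid := max 0 (min x (PySem.Int.floordiv z 5))
  let z := z - 5 * karbid
  if z ≤ y then karbid + z else -1

-- ===== PRECONDITION & SPEC =====
def Spec_moos (x : Int) (y : Int) (z : Int) (out : Int) : Prop := out = moos_alt x y z
instance (x : Int) (y : Int) (z : Int) (out : Int) : Decidable (Spec_moos x y z out) := by unfold Spec_moos; infer_instance

-- ===== CLAIM (what is proved, stated in full; the proofs are below) =====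
def Claim_equal_moos : Prop := ∀ (x : Int) (y : Int) (z : Int), Dom_moos x y z → Spec_moos x y z (moos x y z)

-- ===== LEMMAS AND PROOFS =====
theorem fdiv5_eq (a : Int) : Int.fdiv a 5 = a / 5 := by
  rw [Int.fdiv_eq_ediv]; norm_num

theorem moosLoop_eq (x z karbid : Int) :
    moosLoop x z karbid =
      (karbid + max 0 (min x (PySem.Int.floordiv z 5)),
       z - 5 * max 0 (min x (PySem.Int.floordiv z 5))) := by
  induction x, z, karbid using moosLoop.induct with
  | case1 x z karbid h ih =>
    rw [moosLoop, dif_pos h, ih]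
    simp only [PySem.Int.floordiv, fdiv5_eq, Prod.mk.injEq] at *
    omega
  | case2 x z karbid h =>
    rw [moosLoop, dif_neg h]
    simp only [PySem.Int.floordiv, fdiv5_eq, Prod.mk.injEq] at *
    omega

-- ===== VERDICT (by name: the statement is the Claim_ definition above) =====
theorem moos_spec : Claim_equal_moos := by
  intro x y z _
  unfold Spec_moos moos moos_alt
  rw [moosLoop_eq]
  simp only [zero_add]
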